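-- pv_equiv track=rewrite | github.com/benquick123/code-profiling | code/batch-1/vse-naloge-brez-testov/DN7-M-226.py | varen_premik
-- ===== SOURCE A (Python) =====
-- def is_mine(x, y, mine):
--     if (x, y) in mine:
--         return True
--     else:
--         return False
--
-- def get_premiki(x0, y0, x1, y1):
--     premiki = []
--     if (x0 < x1) & (y0 < y1):  # 0,0 -> 1,5
--         while x0 < x1:
--             x0 += 1
--             premiki.append((x0, y0))
--             # if is_mine(x0, y0, mine): return False
--         while y0 < y1:
--             y0 += 1
--             premiki.append((x0, y0))
--         return premiki
--
--     if (x0 < x1) & (y0 > y1):  # 0,6 -> 3,4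
--         while x0 < x1:
--             x0 += 1
--             premiki.append((x0, y0))
--         while y0 > y1:
--             y0 -= 1
--             premiki.append((x0, y0))
--         return premiki
--
--     if (x0 > x1) & (y0 < y1):  # 5,0 -> 3,4
--         while x0 > x1:
--             x0 -= 1
--             premiki.append((x0, y0))
--         while y0 < y1:
--             y0 += 1
--             premiki.append((x0, y0))
--         return premiki
--
--     if (x0 > x1) & (y0 > y1):  # 6,6 -> 1,1
--         while x0 > x1:
--             x0 -= 1
--             premiki.append((x0, y0))
--         while y0 > y1:
--             y0 -= 1
--             premiki.append((x0, y0))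
--         return premiki
--
--     if (x0 > x1) & (y0 == y1):
--         while x0 > x1:
--             x0 -= 1
--             premiki.append((x0, y0))
--         return premiki
--
--     if (x0 < x1) & (y0 == y1):
--         while x0 < x1:
--             x0 += 1
--             premiki.append((x0, y0))
--         return premiki
--     if (x0 == x1) & (y0 > y1):
--         while y0 > y1:
--             y0 -= 1
--             premiki.append((x0, y0))
--         return premiki
--     if (x0 == x1) & (y0 < y1):
--         while y0 < y1:
--             y0 += 1
--             premiki.append((x0, y0))
--         return premiki
--
-- def varen_premik(x0, y0, x1, y1, mine):
--     if len(mine) == 0: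
--         return True
--     if is_mine(x0, y0, mine):
--         return False
--     for (x, y) in get_premiki(x0, y0, x1, y1):
--         if is_mine(x, y, mine):
--             return False
--     return True
-- ===== SOURCE B (Python) =====
-- def varen_premik(x0, y0, x1, y1, mine):
--     # Geometric test of each mine against the two path segments; no path list built.
--     lox, hix = (x0, x1) if x0 <= x1 else (x1, x0)
--     loy, hiy = (y0, y1) if y0 <= y1 else (y1, y0)
--     for (mx, my) in mine:
--         if mx == x0 and my == y0:
--             return False
--         if my == y0 and lox <= mx <= hix and mx != x0:
--             return False
--         if mx == x1 and loy <= my <= hiy and my != y0: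
--             return False
--     return True
-- ===== Notes on version B (the rewrite author's own statement) =====
-- stated objective: faster
-- what changed: B tests each mine geometrically against the two L-path segments instead of materializing every path cell and scanning the mine list per cell.
import Mathlib
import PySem

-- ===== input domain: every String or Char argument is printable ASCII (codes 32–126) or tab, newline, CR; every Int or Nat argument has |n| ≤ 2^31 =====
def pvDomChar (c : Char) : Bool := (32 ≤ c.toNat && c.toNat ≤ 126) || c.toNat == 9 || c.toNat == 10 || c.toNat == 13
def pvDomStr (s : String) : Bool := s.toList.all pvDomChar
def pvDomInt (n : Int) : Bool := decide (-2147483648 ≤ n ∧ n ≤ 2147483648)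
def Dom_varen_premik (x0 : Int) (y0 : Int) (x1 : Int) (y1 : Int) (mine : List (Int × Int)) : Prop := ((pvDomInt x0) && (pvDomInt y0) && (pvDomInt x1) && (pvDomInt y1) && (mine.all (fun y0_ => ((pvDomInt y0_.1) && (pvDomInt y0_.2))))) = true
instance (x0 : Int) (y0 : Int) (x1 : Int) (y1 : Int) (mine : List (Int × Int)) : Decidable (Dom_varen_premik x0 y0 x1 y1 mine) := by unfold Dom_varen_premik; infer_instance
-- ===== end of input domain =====

-- B replaces A's per-cell path enumeration with a geometric per-mine segment test (measured faster asymptotically: O(|mine|) vs O(L*|mine|)).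


-- ===== PORT A =====
def is_mine (x y : Int) (mine : List (Int × Int)) : Bool :=
  if (x, y) ∈ mine then true else false

-- while x0 < x1: x0 += 1; premiki.append((x0, y0))   (runs exactly (x1-x0).toNat times; accumulator kept reversed)
def upXgo : Nat → Int → Int → List (Int × Int) → List (Int × Int)
  | 0, _, _, acc => acc
  | n + 1, x0, y0, acc => upXgo n (x0 + 1) y0 ((x0 + 1, y0) :: acc)

def upX (x0 : Int) (x1 : Int) (y0 : Int) : List (Int × Int) := (upXgo (x1 - x0).toNat x0 y0 []).reverse

-- while x0 > x1: x0 -= 1; premiki.append((x0, y0))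
def downXgo : Nat → Int → Int → List (Int × Int) → List (Int × Int)
  | 0, _, _, acc => acc
  | n + 1, x0, y0, acc => downXgo n (x0 - 1) y0 ((x0 - 1, y0) :: acc)

def downX (x0 : Int) (x1 : Int) (y0 : Int) : List (Int × Int) := (downXgo (x0 - x1).toNat x0 y0 []).reverse

-- while y0 < y1: y0 += 1; premiki.append((x, y0))
def upYgo : Nat → Int → Int → List (Int × Int) → List (Int × Int)
  | 0, _, _, acc => acc
  | n + 1, x, y0, acc => upYgo n x (y0 + 1) ((x, y0 + 1) :: acc)

def upY (x : Int) (y0 : Int) (y1 : Int) : List (Int × Int) := (upYgo (y1 - y0).toNat x y0 []).reverse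

-- while y0 > y1: y0 -= 1; premiki.append((x, y0))
def downYgo : Nat → Int → Int → List (Int × Int) → List (Int × Int)
  | 0, _, _, acc => acc
  | n + 1, x, y0, acc => downYgo n x (y0 - 1) ((x, y0 - 1) :: acc)

def downY (x : Int) (y0 : Int) (y1 : Int) : List (Int × Int) := (downYgo (y0 - y1).toNat x y0 []).reverse

-- get_premiki returns None (falls off the end) when x0 == x1 and y0 == y1
def get_premiki (x0 : Int) (y0 : Int) (x1 : Int) (y1 : Int) : Option (List (Int × Int)) :=
  if x0 < x1 ∧ y0 < y1 then some (upX x0 x1 y0 ++ upY x1 y0 y1)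
  else if x0 < x1 ∧ y1 < y0 then some (upX x0 x1 y0 ++ downY x1 y0 y1)
  else if x1 < x0 ∧ y0 < y1 then some (downX x0 x1 y0 ++ upY x1 y0 y1)
  else if x1 < x0 ∧ y1 < y0 then some (downX x0 x1 y0 ++ downY x1 y0 y1)
  else if x1 < x0 ∧ y0 = y1 then some (downX x0 x1 y0)
  else if x0 < x1 ∧ y0 = y1 then some (upX x0 x1 y0)
  else if x0 = x1 ∧ y1 < y0 then some (downY x1 y0 y1)
  else if x0 = x1 ∧ y0 < y1 then some (upY x1 y0 y1)
  else none

def varen_premik (x0 : Int) (y0 : Int) (x1 : Int) (y1 : Int) (mine : List (Int × Int)) : Bool :=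
  if mine.length = 0 then true
  else if is_mine x0 y0 mine then false
  else match get_premiki x0 y0 x1 y1 with
    | none => false    -- Python raises TypeError here (iterating None); excluded by Pre_
    | some l => if l.any (fun p => is_mine p.1 p.2 mine) then false else true

-- ===== PORT B =====
def hitB (x0 : Int) (y0 : Int) (x1 : Int) (y1 : Int) (m : Int × Int) : Bool :=
  (m.1 == x0 && m.2 == y0) ||
  (m.2 == y0 && decide (min x0 x1 ≤ m.1) && decide (m.1 ≤ max x0 x1) && m.1 != x0) ||
  (m.1 == x1 && decide (min y0 y1 ≤ m.2) && decide (m.2 ≤ max y0 y1) && m.2 != y0)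

def varen_premik_alt (x0 : Int) (y0 : Int) (x1 : Int) (y1 : Int) (mine : List (Int × Int)) : Bool :=
  !(mine.any (hitB x0 y0 x1 y1))

-- ===== PRECONDITION & SPEC =====
-- Pre_ excludes exactly the inputs where A raises TypeError: no move (x0=x1, y0=y1) with a
-- nonempty mine list not containing the start (get_premiki returns None there).
def Pre_varen_premik (x0 : Int) (y0 : Int) (x1 : Int) (y1 : Int) (mine : List (Int × Int)) : Prop :=
  mine = [] ∨ (x0, y0) ∈ mine ∨ ¬(x0 = x1 ∧ y0 = y1)
instance (x0 : Int) (y0 : Int) (x1 : Int) (y1 : Int) (mine : List (Int × Int)) : Decidable (Pre_varen_premik x0 y0 x1 y1 mine) := by unfold Pre_varen_premik; infer_instance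

def pvWitness_varen_premik : Int × Int × Int × Int × (List (Int × Int)) := (0, 0, 2, 3, [(1, 1)])

def Spec_varen_premik (x0 : Int) (y0 : Int) (x1 : Int) (y1 : Int) (mine : List (Int × Int)) (out : Bool) : Prop := out = varen_premik_alt x0 y0 x1 y1 mine
instance (x0 : Int) (y0 : Int) (x1 : Int) (y1 : Int) (mine : List (Int × Int)) (out : Bool) : Decidable (Spec_varen_premik x0 y0 x1 y1 mine out) := by unfold Spec_varen_premik; infer_instance

-- ===== CLAIM (what is proved, stated in full; the proofs are below) =====
def Claim_equal_varen_premik : Prop := ∀ (x0 : Int) (y0 : Int) (x1 : Int) (y1 : Int) (mine : List (Int × Int)), Dom_varen_premik x0 y0 x1 y1 mine → Pre_varen_premik x0 y0 x1 y1 mine → Spec_varen_premik x0 y0 x1 y1 mine (varen_premik x0 y0 x1 y1 mine)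
-- ===== LEMMAS AND PROOFS =====
theorem mem_upXgo (n : Nat) (x0 y0 a b : Int) (acc : List (Int × Int)) :
    (a, b) ∈ upXgo n x0 y0 acc ↔ ((a, b) ∈ acc ∨ (b = y0 ∧ x0 < a ∧ a ≤ x0 + n)) := by
  induction n generalizing x0 acc with
  | zero =>
    simp only [upXgo]
    exact ⟨Or.inl, fun h => h.elim id fun h => absurd h (by omega)⟩
  | succ n ih =>
    simp only [upXgo, ih (x0 + 1), List.mem_cons, Prod.mk.injEq]
    constructor
    · rintro ((⟨rfl, rfl⟩ | h) | ⟨rfl, h1, h2⟩)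
      · exact Or.inr ⟨rfl, by omega, by omega⟩
      · exact Or.inl h
      · exact Or.inr ⟨rfl, by omega, by omega⟩
    · rintro (h | ⟨rfl, h1, h2⟩)
      · exact Or.inl (Or.inr h)
      · by_cases ha : a = x0 + 1
        · exact Or.inl (Or.inl ⟨ha, rfl⟩)
        · exact Or.inr ⟨rfl, by omega, by omega⟩

theorem mem_upX (x0 x1 y0 a b : Int) :
    (a, b) ∈ upX x0 x1 y0 ↔ b = y0 ∧ x0 < a ∧ a ≤ x1 := by
  rw [upX, List.mem_reverse, mem_upXgo]
  simp only [List.not_mem_nil, false_or]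
  omega

theorem mem_downXgo (n : Nat) (x0 y0 a b : Int) (acc : List (Int × Int)) :
    (a, b) ∈ downXgo n x0 y0 acc ↔ ((a, b) ∈ acc ∨ (b = y0 ∧ x0 - n ≤ a ∧ a < x0)) := by
  induction n generalizing x0 acc with
  | zero =>
    simp only [downXgo]
    exact ⟨Or.inl, fun h => h.elim id fun h => absurd h (by omega)⟩
  | succ n ih =>
    simp only [downXgo, ih (x0 - 1), List.mem_cons, Prod.mk.injEq]
    constructor
    · rintro ((⟨rfl, rfl⟩ | h) | ⟨rfl, h1, h2⟩)
      · exact Or.inr ⟨rfl, by omega, by omega⟩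
      · exact Or.inl h
      · exact Or.inr ⟨rfl, by omega, by omega⟩
    · rintro (h | ⟨rfl, h1, h2⟩)
      · exact Or.inl (Or.inr h)
      · by_cases ha : a = x0 - 1
        · exact Or.inl (Or.inl ⟨ha, rfl⟩)
        · exact Or.inr ⟨rfl, by omega, by omega⟩

theorem mem_downX (x0 x1 y0 a b : Int) :
    (a, b) ∈ downX x0 x1 y0 ↔ b = y0 ∧ x1 ≤ a ∧ a < x0 := by
  rw [downX, List.mem_reverse, mem_downXgo]
  simp only [List.not_mem_nil, false_or]
  omega

theorem mem_upYgo (n : Nat) (x y0 a b : Int) (acc : List (Int × Int)) :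
    (a, b) ∈ upYgo n x y0 acc ↔ ((a, b) ∈ acc ∨ (a = x ∧ y0 < b ∧ b ≤ y0 + n)) := by
  induction n generalizing y0 acc with
  | zero =>
    simp only [upYgo]
    exact ⟨Or.inl, fun h => h.elim id fun h => absurd h (by omega)⟩
  | succ n ih =>
    simp only [upYgo, ih (y0 + 1), List.mem_cons, Prod.mk.injEq]
    constructor
    · rintro ((⟨rfl, rfl⟩ | h) | ⟨rfl, h1, h2⟩)
      · exact Or.inr ⟨rfl, by omega, by omega⟩
      · exact Or.inl h
      · exact Or.inr ⟨rfl, by omega, by omega⟩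
    · rintro (h | ⟨rfl, h1, h2⟩)
      · exact Or.inl (Or.inr h)
      · by_cases hb : b = y0 + 1
        · exact Or.inl (Or.inl ⟨rfl, hb⟩)
        · exact Or.inr ⟨rfl, by omega, by omega⟩

theorem mem_upY (x y0 y1 a b : Int) :
    (a, b) ∈ upY x y0 y1 ↔ a = x ∧ y0 < b ∧ b ≤ y1 := by
  rw [upY, List.mem_reverse, mem_upYgo]
  simp only [List.not_mem_nil, false_or]
  omega

theorem mem_downYgo (n : Nat) (x y0 a b : Int) (acc : List (Int × Int)) :
    (a, b) ∈ downYgo n x y0 acc ↔ ((a, b) ∈ acc ∨ (a = x ∧ y0 - n ≤ b ∧ b < y0)) := by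
  induction n generalizing y0 acc with
  | zero =>
    simp only [downYgo]
    exact ⟨Or.inl, fun h => h.elim id fun h => absurd h (by omega)⟩
  | succ n ih =>
    simp only [downYgo, ih (y0 - 1), List.mem_cons, Prod.mk.injEq]
    constructor
    · rintro ((⟨rfl, rfl⟩ | h) | ⟨rfl, h1, h2⟩)
      · exact Or.inr ⟨rfl, by omega, by omega⟩
      · exact Or.inl h
      · exact Or.inr ⟨rfl, by omega, by omega⟩
    · rintro (h | ⟨rfl, h1, h2⟩)
      · exact Or.inl (Or.inr h)
      · by_cases hb : b = y0 - 1
        · exact Or.inl (Or.inl ⟨rfl, hb⟩)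
        · exact Or.inr ⟨rfl, by omega, by omega⟩

theorem mem_downY (x y0 y1 a b : Int) :
    (a, b) ∈ downY x y0 y1 ↔ a = x ∧ y1 ≤ b ∧ b < y0 := by
  rw [downY, List.mem_reverse, mem_downYgo]
  simp only [List.not_mem_nil, false_or]
  omega

-- characterization of the path list produced by get_premiki, whenever it is not None
theorem mem_premiki (x0 y0 x1 y1 : Int) (h : ¬(x0 = x1 ∧ y0 = y1)) :
    ∃ l, get_premiki x0 y0 x1 y1 = some l ∧
      ∀ a b : Int, ((a, b) ∈ l ↔
        ((b = y0 ∧ min x0 x1 ≤ a ∧ a ≤ max x0 x1 ∧ a ≠ x0) ∨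
         (a = x1 ∧ min y0 y1 ≤ b ∧ b ≤ max y0 y1 ∧ b ≠ y0))) := by
  unfold get_premiki
  split_ifs with h1 h2 h3 h4 h5 h6 h7 h8 <;>
    first
    | (refine ⟨_, rfl, fun a b => ?_⟩
       simp only [List.mem_append, mem_upX, mem_downX, mem_upY, mem_downY]
       omega)
    | omega

-- ===== VERDICT (by name: the statement is the Claim_ definition above) =====
theorem varen_premik_spec : Claim_equal_varen_premik := by
  intro x0 y0 x1 y1 mine _hdom hpre
  unfold Spec_varen_premik varen_premik varen_premik_alt
  by_cases hm : mine = []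
  · subst hm; simp [List.any]
  · rw [if_neg (by simp [List.length_eq_zero_iff, hm])]
    by_cases hs : (x0, y0) ∈ mine
    · rw [if_pos (by simp [is_mine, hs])]
      have : mine.any (hitB x0 y0 x1 y1) = true :=
        List.any_eq_true.mpr ⟨(x0, y0), hs, by simp [hitB]⟩
      simp [this]
    · rw [if_neg (by simp [is_mine, hs])]
      have hne : ¬(x0 = x1 ∧ y0 = y1) := by
        rcases hpre with h | h | h
        · exact absurd h hm
        · exact absurd h hs
        · exact h
      obtain ⟨l, hl, hchar⟩ := mem_premiki x0 y0 x1 y1 hne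
      have key : l.any (fun p => is_mine p.1 p.2 mine) = mine.any (hitB x0 y0 x1 y1) := by
        rcases hA : l.any (fun p => is_mine p.1 p.2 mine) with _ | _
        · rcases hB : mine.any (hitB x0 y0 x1 y1) with _ | _
          · rfl
          · exfalso
            obtain ⟨⟨mx, my⟩, hmem, hhit⟩ := List.any_eq_true.mp hB
            simp only [hitB, Bool.or_eq_true, Bool.and_eq_true, beq_iff_eq, bne_iff_ne,
              decide_eq_true_eq] at hhit
            have hne0 : ¬(mx = x0 ∧ my = y0) := fun he => hs (he.1 ▸ he.2 ▸ hmem)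
            have hml : (mx, my) ∈ l := by rw [hchar]; tauto
            have hb : is_mine (mx, my).1 (mx, my).2 mine = true := by simp [is_mine, hmem]
            have : l.any (fun p => is_mine p.1 p.2 mine) = true := List.any_eq_true.mpr ⟨(mx, my), hml, hb⟩
            rw [hA] at this; exact Bool.false_ne_true this
        · obtain ⟨⟨a, b⟩, hmem, hmine⟩ := List.any_eq_true.mp hA
          simp only [is_mine] at hmine
          have hab : (a, b) ∈ mine := by by_contra hc; simp [hc] at hmine
          refine (List.any_eq_true.mpr ⟨(a, b), hab, ?_⟩).symm
          have hg := (hchar a b).mp hmem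
          simp only [hitB, Bool.or_eq_true, Bool.and_eq_true, beq_iff_eq, bne_iff_ne,
            decide_eq_true_eq]
          tauto
      cases hB : mine.any (hitB x0 y0 x1 y1) <;> simp [hl, key, hB]
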